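-- pv_equiv track=rewrite | github.com/Fondamenti18/fondamenti-di-programmazione | students/1796477/homework01/program02.py | convApp
-- ===== SOURCE A (Python) =====
-- diz119={1:'uno',2:'due',3:'tre',4:'quattro',5:'cinque',6:'sei',7:'sette',8:'otto',9:'nove',10:'dieci',11:'undici',12:'dodici',13:'tredici',14:'quattordici',15:'quindici',16:'sedici',17:'diciassette',18:'diciotto',19:'diciannove'}
--
-- dizDec={2:'venti',3:'trenta',4:'quaranta',5:'cinquanta',6:'sessanta',7:'settanta',8:'ottanta',9:'novanta'}
--
-- def convApp(n):
--     if n == 0: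
--         return ""
--
--     elif n <= 19:
--         return diz119[n]
--
--     elif n <= 99:
--
--         parola = dizDec[n//10]
--         unita = n%10
--         if unita == 1 or unita == 8:
--             parola = parola[:-1]
--         return parola + convApp(n%10)
--
--
--     elif n <= 999:
--         decine = n%100
--         decine = (decine//10)
--         parola = "cent"
--         centinaia=''
--         if decine != 8:
--             parola = parola + "o"
--         if n//100!=1:
--             centinaia=diz119[n//100]
--
--         return centinaia + parola + convApp(n%100)
--
--     elif n<= 1999 :
--         return "mille" + convApp(n%1000)
--
--     elif n<= 999999:
--         return convApp(n//1000) +"mila" + convApp(n%1000)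
--
--     elif n <= 1999999:
--         return "unmilione" + convApp(n%1000000)
--
--     elif n <= 999999999:
--         return convApp(n//1000000)+  "milioni" + convApp(n%1000000)
--     elif n <= 1999999999:
--         return "unmiliardo" + convApp(n%1000000000)
--
--     else:
--         return convApp(n//1000000000) + "miliardi" +convApp(n%1000000000)
-- ===== SOURCE B (Python) =====
-- diz119={1:'uno',2:'due',3:'tre',4:'quattro',5:'cinque',6:'sei',7:'sette',8:'otto',9:'nove',10:'dieci',11:'undici',12:'dodici',13:'tredici',14:'quattordici',15:'quindici',16:'sedici',17:'diciassette',18:'diciotto',19:'diciannove'}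
-- dizDec={2:'venti',3:'trenta',4:'quaranta',5:'cinquanta',6:'sessanta',7:'settanta',8:'ottanta',9:'novanta'}
--
-- def _spell2(r):
--     # 0..99
--     if r == 0:
--         return ""
--     if r <= 19:
--         return diz119[r]
--     t = dizDec[r // 10]
--     u = r % 10
--     if u == 1 or u == 8:
--         t = t[:-1]
--     return t + ("" if u == 0 else diz119[u])
--
-- def _spell3(m):
--     # 0..999
--     h, r = divmod(m, 100)
--     if h == 0:
--         return _spell2(r)
--     return ("" if h == 1 else diz119[h]) + ("cent" if r // 10 == 8 else "cento") + _spell2(r)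
--
-- def _scaled(g, one, many):
--     # spelling of a thousand-group g with its scale words
--     if g == 0:
--         return ""
--     if g == 1:
--         return one
--     return _spell3(g) + many
--
-- def convApp(n):
--     b, r = divmod(n, 10 ** 9)
--     m, r = divmod(r, 10 ** 6)
--     k, u = divmod(r, 1000)
--     return (_scaled(b, "unmiliardo", "miliardi")
--             + _scaled(m, "unmilione", "milioni")
--             + _scaled(k, "mille", "mila")
--             + _spell3(u))
-- ===== Notes on version B (the rewrite author's own statement) =====
-- stated objective: alternative
-- what changed: A's nine-branch recursive descent (with singular cases folded into the recursion) is replaced by a flat divmod decomposition of n into billion/million/thousand/unit groups, each spelled by a 0-999 helper and given its scale word ('' / mille-mila / unmilione-milioni / unmiliardo-miliardi).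
import Mathlib
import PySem

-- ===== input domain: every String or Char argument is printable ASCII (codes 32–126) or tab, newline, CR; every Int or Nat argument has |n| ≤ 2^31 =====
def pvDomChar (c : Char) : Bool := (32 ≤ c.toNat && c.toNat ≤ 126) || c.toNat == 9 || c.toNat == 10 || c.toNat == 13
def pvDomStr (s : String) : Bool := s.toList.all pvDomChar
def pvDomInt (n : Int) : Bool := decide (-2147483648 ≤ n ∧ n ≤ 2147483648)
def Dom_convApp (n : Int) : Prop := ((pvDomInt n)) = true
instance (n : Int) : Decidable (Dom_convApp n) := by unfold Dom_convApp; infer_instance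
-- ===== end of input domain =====

-- B replaces A's nine-branch recursive descent by a flat divmod split into thousand-groups
-- (billions/millions/thousands/units), each spelled by a 0–999 helper; objective: alternative decomposition.

-- ===== PORT A =====
-- shared data: the two module-level dict literals (used verbatim by both Pythons)
def diz119 : PySem.Dict Int String := PySem.Dict.ofList
  [(1,"uno"),(2,"due"),(3,"tre"),(4,"quattro"),(5,"cinque"),(6,"sei"),(7,"sette"),(8,"otto"),(9,"nove"),
   (10,"dieci"),(11,"undici"),(12,"dodici"),(13,"tredici"),(14,"quattordici"),(15,"quindici"),(16,"sedici"),
   (17,"diciassette"),(18,"diciotto"),(19,"diciannove")]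

def dizDec : PySem.Dict Int String := PySem.Dict.ofList
  [(2,"venti"),(3,"trenta"),(4,"quaranta"),(5,"cinquanta"),(6,"sessanta"),(7,"settanta"),(8,"ottanta"),(9,"novanta")]

-- diz119[n] / dizDec[k] raise KeyError exactly when the key is absent, which under Pre_ (n ≥ 0) never
-- happens; getD with "" stands for the always-successful lookup on that domain.
def convApp (n : Int) : String :=
  if n = 0 then ""
  else if n ≤ 19 then diz119.getD n ""
  else if n ≤ 99 then
    (if PySem.Int.mod n 10 = 1 ∨ PySem.Int.mod n 10 = 8
       then PySem.Str.slice (dizDec.getD (PySem.Int.floordiv n 10) "") none (some (-1))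
       else dizDec.getD (PySem.Int.floordiv n 10) "")
    ++ convApp (PySem.Int.mod n 10)
  else if n ≤ 999 then
    (if PySem.Int.floordiv n 100 ≠ 1 then diz119.getD (PySem.Int.floordiv n 100) "" else "")
    ++ (if PySem.Int.floordiv (PySem.Int.mod n 100) 10 ≠ 8 then "cent" ++ "o" else "cent")
    ++ convApp (PySem.Int.mod n 100)
  else if n ≤ 1999 then "mille" ++ convApp (PySem.Int.mod n 1000)
  else if n ≤ 999999 then convApp (PySem.Int.floordiv n 1000) ++ "mila" ++ convApp (PySem.Int.mod n 1000)
  else if n ≤ 1999999 then "unmilione" ++ convApp (PySem.Int.mod n 1000000)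
  else if n ≤ 999999999 then convApp (PySem.Int.floordiv n 1000000) ++ "milioni" ++ convApp (PySem.Int.mod n 1000000)
  else if n ≤ 1999999999 then "unmiliardo" ++ convApp (PySem.Int.mod n 1000000000)
  else convApp (PySem.Int.floordiv n 1000000000) ++ "miliardi" ++ convApp (PySem.Int.mod n 1000000000)
termination_by n.toNat
decreasing_by
  all_goals
    first
    | (have h1 := PySem.Int.mod_nonneg n (b := 10) (by omega)
       have h2 := PySem.Int.mod_lt n (b := 10) (by omega); omega)
    | (have h1 := PySem.Int.mod_nonneg n (b := 100) (by omega)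
       have h2 := PySem.Int.mod_lt n (b := 100) (by omega); omega)
    | (have h1 := PySem.Int.mod_nonneg n (b := 1000) (by omega)
       have h2 := PySem.Int.mod_lt n (b := 1000) (by omega); omega)
    | (have h1 := PySem.Int.mod_nonneg n (b := 1000000) (by omega)
       have h2 := PySem.Int.mod_lt n (b := 1000000) (by omega); omega)
    | (have h1 := PySem.Int.mod_nonneg n (b := 1000000000) (by omega)
       have h2 := PySem.Int.mod_lt n (b := 1000000000) (by omega); omega)
    | (have h1 := PySem.Int.floordiv_mul_add_mod n 1000
       have h2 := PySem.Int.mod_nonneg n (b := 1000) (by omega)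
       have h3 := PySem.Int.mod_lt n (b := 1000) (by omega); omega)
    | (have h1 := PySem.Int.floordiv_mul_add_mod n 1000000
       have h2 := PySem.Int.mod_nonneg n (b := 1000000) (by omega)
       have h3 := PySem.Int.mod_lt n (b := 1000000) (by omega); omega)
    | (have h1 := PySem.Int.floordiv_mul_add_mod n 1000000000
       have h2 := PySem.Int.mod_nonneg n (b := 1000000000) (by omega)
       have h3 := PySem.Int.mod_lt n (b := 1000000000) (by omega); omega)

-- ===== PORT B =====
-- _spell2: 0..99
def spell2B (r : Int) : String :=
  if r = 0 then ""
  else if r ≤ 19 then diz119.getD r ""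
  else
    (if PySem.Int.mod r 10 = 1 ∨ PySem.Int.mod r 10 = 8
       then PySem.Str.slice (dizDec.getD (PySem.Int.floordiv r 10) "") none (some (-1))
       else dizDec.getD (PySem.Int.floordiv r 10) "")
    ++ (if PySem.Int.mod r 10 = 0 then "" else diz119.getD (PySem.Int.mod r 10) "")

-- _spell3: 0..999
def spell3B (m : Int) : String :=
  if PySem.Int.floordiv m 100 = 0 then spell2B (PySem.Int.mod m 100)
  else
    (if PySem.Int.floordiv m 100 = 1 then "" else diz119.getD (PySem.Int.floordiv m 100) "")
    ++ (if PySem.Int.floordiv (PySem.Int.mod m 100) 10 = 8 then "cent" else "cento")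
    ++ spell2B (PySem.Int.mod m 100)

-- _scaled: one thousand-group with its scale words
def scaledB (g : Int) (one many : String) : String :=
  if g = 0 then "" else if g = 1 then one else spell3B g ++ many

def convApp_alt (n : Int) : String :=
  scaledB (PySem.Int.floordiv n 1000000000) "unmiliardo" "miliardi"
  ++ scaledB (PySem.Int.floordiv (PySem.Int.mod n 1000000000) 1000000) "unmilione" "milioni"
  ++ scaledB (PySem.Int.floordiv (PySem.Int.mod (PySem.Int.mod n 1000000000) 1000000) 1000) "mille" "mila"
  ++ spell3B (PySem.Int.mod (PySem.Int.mod (PySem.Int.mod n 1000000000) 1000000) 1000)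

-- ===== PRECONDITION & SPEC =====
-- Pre_ excludes n < 0, where A's diz119[n] lookup raises KeyError (B raises KeyError there too).
def Pre_convApp (n : Int) : Prop := 0 ≤ n
instance (n : Int) : Decidable (Pre_convApp n) := by unfold Pre_convApp; infer_instance
def pvWitness_convApp : Int := (21)

def Spec_convApp (n : Int) (out : String) : Prop := out = convApp_alt n
instance (n : Int) (out : String) : Decidable (Spec_convApp n out) := by unfold Spec_convApp; infer_instance

-- ===== CLAIM (what is proved, stated in full; the proofs are below) =====
def Claim_equal_convApp : Prop := ∀ (n : Int), Dom_convApp n → Pre_convApp n → Spec_convApp n (convApp n)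

-- ===== LEMMAS AND PROOFS =====

theorem pvFdmd (n k : Int) (hk : 0 < k) :
    PySem.Int.floordiv n k * k + PySem.Int.mod n k = n ∧
    0 ≤ PySem.Int.mod n k ∧ PySem.Int.mod n k < k :=
  ⟨PySem.Int.floordiv_mul_add_mod n k, PySem.Int.mod_nonneg n hk, PySem.Int.mod_lt n hk⟩

theorem cent_o : "cent" ++ "o" = "cento" := by decide

theorem units_eq (u : Int) (_h0 : 0 ≤ u) (h9 : u ≤ 9) :
    convApp u = (if u = 0 then "" else diz119.getD u "") := by
  rw [convApp]
  by_cases h : u = 0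
  · simp [h]
  · rw [if_neg h, if_pos (by omega), if_neg h]

theorem spell2_eq (r : Int) (_h0 : 0 ≤ r) (h99 : r ≤ 99) : convApp r = spell2B r := by
  rw [convApp, spell2B]
  by_cases hz : r = 0
  · simp [hz]
  · rw [if_neg hz, if_neg hz]
    by_cases h19 : r ≤ 19
    · rw [if_pos h19, if_pos h19]
    · rw [if_neg h19, if_neg h19, if_pos h99]
      obtain ⟨_, hm0, hm1⟩ := pvFdmd r 10 (by omega)
      rw [units_eq (PySem.Int.mod r 10) hm0 (by omega)]

theorem spell3_eq (m : Int) (h0 : 0 ≤ m) (h999 : m ≤ 999) : convApp m = spell3B m := by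
  obtain ⟨hq, hm0, hm1⟩ := pvFdmd m 100 (by omega)
  by_cases h99 : m ≤ 99
  · have hfd : PySem.Int.floordiv m 100 = 0 := by omega
    have hmd : PySem.Int.mod m 100 = m := by omega
    rw [spell3B, hfd, if_pos rfl, hmd, spell2_eq m h0 h99]
  · have hne : ¬PySem.Int.floordiv m 100 = 0 := by omega
    rw [convApp, if_neg (by omega), if_neg (by omega), if_neg h99, if_pos h999]
    conv_rhs => rw [spell3B, if_neg hne]
    rw [spell2_eq (PySem.Int.mod m 100) hm0 (by omega)]
    congr 1
    congr 1
    · by_cases h1 : PySem.Int.floordiv m 100 = 1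
      · rw [if_neg (not_not_intro h1), if_pos h1]
      · rw [if_pos h1, if_neg h1]
    · by_cases h8 : PySem.Int.floordiv (PySem.Int.mod m 100) 10 = 8
      · rw [if_neg (not_not_intro h8), if_pos h8]
      · rw [if_pos h8, if_neg h8, cent_o]

theorem scaled_zero (one many : String) : scaledB 0 one many = "" := by rw [scaledB]; simp

theorem scaled_one (one many : String) : scaledB 1 one many = one := by rw [scaledB]; simp

theorem scaled_big (g : Int) (hg : 2 ≤ g) (one many : String) :
    scaledB g one many = spell3B g ++ many := by
  rw [scaledB, if_neg (by omega), if_neg (by omega)]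

-- the thousands level: convApp on 0..999999 equals B's bottom two groups
theorem level6_eq (n : Int) (h0 : 0 ≤ n) (hn : n ≤ 999999) :
    convApp n = scaledB (PySem.Int.floordiv n 1000) "mille" "mila" ++ spell3B (PySem.Int.mod n 1000) := by
  obtain ⟨hq, hm0, hm1⟩ := pvFdmd n 1000 (by omega)
  by_cases h999 : n ≤ 999
  · have hfd : PySem.Int.floordiv n 1000 = 0 := by omega
    have hmd : PySem.Int.mod n 1000 = n := by omega
    rw [hfd, scaled_zero, hmd, spell3_eq n h0 h999, String.empty_append]
  · by_cases h1999 : n ≤ 1999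
    · have hfd : PySem.Int.floordiv n 1000 = 1 := by omega
      rw [convApp, if_neg (by omega), if_neg (by omega), if_neg (by omega), if_neg (by omega),
          if_pos h1999, hfd, scaled_one, spell3_eq (PySem.Int.mod n 1000) hm0 (by omega)]
    · rw [convApp, if_neg (by omega), if_neg (by omega), if_neg (by omega), if_neg (by omega),
          if_neg h1999, if_pos hn, scaled_big _ (by omega),
          spell3_eq (PySem.Int.floordiv n 1000) (by omega) (by omega),
          spell3_eq (PySem.Int.mod n 1000) hm0 (by omega)]

-- the millions level: convApp on 0..999999999 equals B's bottom three groups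
theorem level9_eq (n : Int) (h0 : 0 ≤ n) (hn : n ≤ 999999999) :
    convApp n = scaledB (PySem.Int.floordiv n 1000000) "unmilione" "milioni"
      ++ scaledB (PySem.Int.floordiv (PySem.Int.mod n 1000000) 1000) "mille" "mila"
      ++ spell3B (PySem.Int.mod (PySem.Int.mod n 1000000) 1000) := by
  obtain ⟨hq, hm0, hm1⟩ := pvFdmd n 1000000 (by omega)
  by_cases h6 : n ≤ 999999
  · have hfd : PySem.Int.floordiv n 1000000 = 0 := by omega
    have hmd : PySem.Int.mod n 1000000 = n := by omega
    rw [hfd, scaled_zero, hmd, String.empty_append, level6_eq n h0 h6]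
  · by_cases h16 : n ≤ 1999999
    · have hfd : PySem.Int.floordiv n 1000000 = 1 := by omega
      rw [convApp, if_neg (by omega), if_neg (by omega), if_neg (by omega), if_neg (by omega),
          if_neg (by omega), if_neg h6, if_pos h16, hfd, scaled_one,
          level6_eq (PySem.Int.mod n 1000000) hm0 (by omega)]
      simp [String.append_assoc]
    · rw [convApp, if_neg (by omega), if_neg (by omega), if_neg (by omega), if_neg (by omega),
          if_neg (by omega), if_neg h6, if_neg h16, if_pos hn, scaled_big _ (by omega),
          spell3_eq (PySem.Int.floordiv n 1000000) (by omega) (by omega),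
          level6_eq (PySem.Int.mod n 1000000) hm0 (by omega)]
      simp [String.append_assoc]

theorem convApp_eq_alt (n : Int) (h0 : 0 ≤ n) (hn : n ≤ 2147483648) :
    convApp n = convApp_alt n := by
  obtain ⟨hq, hm0, hm1⟩ := pvFdmd n 1000000000 (by omega)
  rw [convApp_alt]
  by_cases h9 : n ≤ 999999999
  · have hfd : PySem.Int.floordiv n 1000000000 = 0 := by omega
    have hmd : PySem.Int.mod n 1000000000 = n := by omega
    rw [hfd, scaled_zero, hmd, String.empty_append, level9_eq n h0 h9]
  · by_cases h19 : n ≤ 1999999999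
    · have hfd : PySem.Int.floordiv n 1000000000 = 1 := by omega
      rw [convApp, if_neg (by omega), if_neg (by omega), if_neg (by omega), if_neg (by omega),
          if_neg (by omega), if_neg (by omega), if_neg (by omega), if_neg (by omega), if_pos h19,
          hfd, scaled_one, level9_eq (PySem.Int.mod n 1000000000) hm0 (by omega)]
      simp [String.append_assoc]
    · rw [convApp, if_neg (by omega), if_neg (by omega), if_neg (by omega), if_neg (by omega),
          if_neg (by omega), if_neg (by omega), if_neg (by omega), if_neg (by omega), if_neg h19,
          scaled_big _ (by omega),
          spell3_eq (PySem.Int.floordiv n 1000000000) (by omega) (by omega),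
          level9_eq (PySem.Int.mod n 1000000000) hm0 (by omega)]
      simp [String.append_assoc]

-- ===== VERDICT (by name: the statement is the Claim_ definition above) =====
theorem convApp_spec : Claim_equal_convApp := by
  intro n hdom hpre
  unfold Spec_convApp
  have hd : -2147483648 ≤ n ∧ n ≤ 2147483648 := by
    simpa [Dom_convApp, pvDomInt] using hdom
  exact convApp_eq_alt n hpre hd.2
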